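-- pv_equiv track=rewrite | github.com/sarahchou/HoliBot | twilio_code/reply.py | format_stars
-- ===== SOURCE A (Python) =====
-- def format_stars(holiday):
--     s = "*=*=*=*=*=*=*="
--     i = 0
--
--     while i < len(holiday):
--         if i % 2 == 0:
--             s += "*"
--         else:
--             s += "="
--         i += 1
--
--     return s
-- ===== SOURCE B (Python) =====
-- def format_stars(holiday):
--     n = len(holiday)
--     return "*=*=*=*=*=*=*=" + ("*=" * ((n + 1) // 2))[:n]
-- ===== Notes on version B (the rewrite author's own statement) =====
-- stated objective: simpler
-- what changed: Replaces the per-index while loop with a closed-form repeat-and-slice: the '*=' unit repeated ceil(n/2) times and sliced to n characters, appended to the fixed prefix.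
import Mathlib
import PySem

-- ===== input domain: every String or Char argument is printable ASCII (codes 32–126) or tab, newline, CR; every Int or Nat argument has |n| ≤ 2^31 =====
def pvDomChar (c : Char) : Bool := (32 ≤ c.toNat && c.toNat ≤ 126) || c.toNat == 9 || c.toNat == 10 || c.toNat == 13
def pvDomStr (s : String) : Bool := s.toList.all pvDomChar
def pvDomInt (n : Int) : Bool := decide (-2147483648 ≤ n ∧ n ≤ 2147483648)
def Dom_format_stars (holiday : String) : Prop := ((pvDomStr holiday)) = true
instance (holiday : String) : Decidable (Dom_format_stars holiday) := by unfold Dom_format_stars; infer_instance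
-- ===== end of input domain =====

-- B replaces A's per-index while loop with a closed form: "*=" repeated ceil(n/2) times, sliced to n chars, after the fixed prefix.

-- ===== PORT A =====
-- the while loop: i counts up to n, appending '*' on even i and '=' on odd i
def format_stars_loop (n i : Nat) (s : List Char) : List Char :=
  if i < n then
    format_stars_loop n (i + 1) (s ++ [if i % 2 = 0 then '*' else '='])
  else s
termination_by n - i

def format_stars (holiday : String) : String :=
  String.mk (format_stars_loop holiday.toList.length 0 "*=*=*=*=*=*=*=".toList)

-- ===== PORT B =====
def format_stars_alt (holiday : String) : String :=
  String.mk ("*=*=*=*=*=*=*=".toList ++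
    (List.replicate ((holiday.toList.length + 1) / 2) ['*', '=']).flatten.take holiday.toList.length)

-- ===== PRECONDITION & SPEC =====
def Spec_format_stars (holiday : String) (out : String) : Prop := out = format_stars_alt holiday
instance (holiday : String) (out : String) : Decidable (Spec_format_stars holiday out) := by unfold Spec_format_stars; infer_instance

-- ===== CLAIM (what is proved, stated in full; the proofs are below) =====
def Claim_equal_format_stars : Prop := ∀ (holiday : String), Dom_format_stars holiday → Spec_format_stars holiday (format_stars holiday)

-- ===== LEMMAS AND PROOFS =====

def pvAlt (i : Nat) : Char := if i % 2 = 0 then '*' else '='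

theorem format_stars_loop_eq (n : Nat) : ∀ (i : Nat) (s : List Char),
    format_stars_loop n i s = s ++ (List.range' i (n - i)).map pvAlt := by
  intro i s
  by_cases h : i < n
  · rw [format_stars_loop]
    simp only [h, if_pos]
    rw [format_stars_loop_eq n (i + 1) (s ++ [if i % 2 = 0 then '*' else '='])]
    have hn : n - i = (n - (i + 1)) + 1 := by omega
    rw [hn, List.range'_succ]
    simp [pvAlt]
  · rw [format_stars_loop]
    simp only [h, if_false]
    have : n - i = 0 := by omega
    simp [this]
termination_by i => n - i

theorem flatten_replicate_pair (m : Nat) :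
    (List.replicate m ['*', '=']).flatten = (List.range (2 * m)).map pvAlt := by
  induction m with
  | zero => simp
  | succ m ih =>
    rw [List.replicate_succ', List.flatten_append, ih]
    have h2 : 2 * (m + 1) = (2 * m + 1) + 1 := by ring
    rw [h2, List.range_succ, List.range_succ]
    simp [pvAlt, Nat.mul_mod_right]

theorem take_pattern (n : Nat) :
    (List.replicate ((n + 1) / 2) ['*', '=']).flatten.take n = (List.range n).map pvAlt := by
  rw [flatten_replicate_pair, ← List.map_take, List.take_range,
    show min n (2 * ((n + 1) / 2)) = n from by omega]

-- ===== VERDICT (by name: the statement is the Claim_ definition above) =====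
theorem format_stars_spec : Claim_equal_format_stars := by
  intro holiday _
  unfold Spec_format_stars format_stars format_stars_alt
  rw [format_stars_loop_eq, take_pattern]
  simp [List.range_eq_range']
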